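-- pv_equiv track=rewrite | github.com/joelchanabs/ckanext-datagovau | ckanext/datagovau/spatialingestor.py | _get_valid_qname
-- ===== SOURCE A (Python) =====
-- def _get_valid_qname(raw_string):
--     if any([c.isalpha() for c in raw_string]):
--         if not (raw_string == '' or raw_string[0].isalpha()):
--             raw_string += '-'
--             while not raw_string[0].isalpha():
--                 first_literal = raw_string[0]
--                 raw_string = raw_string[1:]
--                 if first_literal.isdigit():
--                     raw_string += first_literal
--             if raw_string[-1] == '-':
--                 raw_string = raw_string[:-1]
--     else:
--         raw_string = 'ckan-' + raw_string
--
--     return raw_string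
-- ===== SOURCE B (Python) =====
-- def _get_valid_qname(raw_string):
--     if not any(c.isalpha() for c in raw_string):
--         return 'ckan-' + raw_string
--     idx = next(i for i, c in enumerate(raw_string) if c.isalpha())
--     if idx == 0:
--         return raw_string
--     digits = ''.join(c for c in raw_string[:idx] if c.isdigit())
--     suffix = raw_string[idx:]
--     return suffix + '-' + digits if digits else suffix
-- ===== Notes on version B (the rewrite author's own statement) =====
-- stated objective: simpler
-- what changed: Replaced A's destructive rotating while-loop (repeatedly popping the first char and re-appending digits, then trimming a trailing '-') by locating the index of the first alphabetic char, slicing into prefix/suffix, and filtering the prefix's digits once.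
import Mathlib
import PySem

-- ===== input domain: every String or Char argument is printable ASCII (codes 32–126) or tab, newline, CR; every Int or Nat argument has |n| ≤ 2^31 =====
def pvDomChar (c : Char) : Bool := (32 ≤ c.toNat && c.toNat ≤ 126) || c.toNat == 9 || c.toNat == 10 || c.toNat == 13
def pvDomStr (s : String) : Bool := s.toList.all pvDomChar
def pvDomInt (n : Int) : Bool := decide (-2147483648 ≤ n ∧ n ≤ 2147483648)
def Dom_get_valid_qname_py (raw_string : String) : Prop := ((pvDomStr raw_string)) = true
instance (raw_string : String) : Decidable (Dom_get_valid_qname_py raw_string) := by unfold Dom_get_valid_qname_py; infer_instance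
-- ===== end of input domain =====

-- B replaces A's rotating pop-and-append while-loop by locate-first-alpha, slice, filter digits (objective: simpler).

-- ===== PORT A =====
-- the while-loop: pop the first char while it is not alphabetic, re-appending it at the end
-- when it is a digit; fuel bounds the iterations (the loop always stops at the first alpha
-- char, which is reached in fewer than the initial length steps)
def pvLoopA : Nat → List Char → List Char
  | 0, l => l
  | fuel + 1, l =>
    match l with
    | [] => []
    | c :: rest =>
      if PySem.Chars.isalpha c then c :: rest
      else pvLoopA fuel (if PySem.Chars.isdigit c then rest ++ [c] else rest)

def get_valid_qname_py (raw_string : String) : String :=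
  let l := raw_string.toList
  if (l.map PySem.Chars.isalpha).any id then
    if l = [] ∨ PySem.Chars.isalpha l.headI then raw_string
    else
      let l1 := l ++ ['-']
      let l2 := pvLoopA l1.length l1
      String.ofList (if l2.getLast? = some '-' then l2.dropLast else l2)
  else
    String.ofList ("ckan-".toList ++ l)

-- ===== PORT B =====
def get_valid_qname_py_alt (raw_string : String) : String :=
  let l := raw_string.toList
  if ¬ l.any PySem.Chars.isalpha then
    String.ofList ("ckan-".toList ++ l)
  else
    let idx := l.findIdx PySem.Chars.isalpha
    if idx = 0 then raw_string
    else
      let digits := (l.take idx).filter PySem.Chars.isdigit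
      let suffix := l.drop idx
      String.ofList (if digits = [] then suffix else suffix ++ '-' :: digits)

-- ===== PRECONDITION & SPEC =====
def Spec_get_valid_qname_py (raw_string : String) (out : String) : Prop := out = get_valid_qname_py_alt raw_string
instance (raw_string : String) (out : String) : Decidable (Spec_get_valid_qname_py raw_string out) := by unfold Spec_get_valid_qname_py; infer_instance

-- ===== CLAIM (what is proved, stated in full; the proofs are below) =====
def Claim_equal_get_valid_qname_py : Prop := ∀ (raw_string : String), Dom_get_valid_qname_py raw_string → Spec_get_valid_qname_py raw_string (get_valid_qname_py raw_string)

-- ===== LEMMAS AND PROOFS =====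

-- the loop consumes exactly the non-alpha prefix, appending its digits after the rest
lemma pvLoopA_spec (p : List Char) : ∀ (fuel : Nat) (a : Char) (rest : List Char),
    p.length ≤ fuel → (∀ c ∈ p, PySem.Chars.isalpha c = false) → PySem.Chars.isalpha a = true →
    pvLoopA fuel (p ++ a :: rest) = a :: rest ++ p.filter PySem.Chars.isdigit := by
  induction p with
  | nil =>
    intro fuel a rest _ _ ha
    cases fuel with
    | zero => simp [pvLoopA]
    | succ f => simp [pvLoopA, ha]
  | cons c p ih =>
    intro fuel a rest hfuel hnon ha
    cases fuel with
    | zero => simp at hfuel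
    | succ f =>
      have hc : PySem.Chars.isalpha c = false := hnon c (List.mem_cons_self ..)
      have hp : ∀ x ∈ p, PySem.Chars.isalpha x = false := fun x hx => hnon x (List.mem_cons_of_mem _ hx)
      have hf : p.length ≤ f := by simpa using hfuel
      by_cases hd : PySem.Chars.isdigit c = true
      · have h2 := ih f a (rest ++ [c]) hf hp ha
        simp [pvLoopA, hc, hd]
        rw [h2]
        simp
      · have h2 := ih f a rest hf hp ha
        simp [pvLoopA, hc, hd]
        rw [h2]
        simp

lemma pv_findIdx_eq_takeWhile_length (l : List Char) :
    l.findIdx PySem.Chars.isalpha = (l.takeWhile (fun c => !PySem.Chars.isalpha c)).length := by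
  induction l with
  | nil => simp
  | cons c l ih =>
    by_cases h : PySem.Chars.isalpha c = true
    · simp [List.findIdx_cons, h]
    · simp only [Bool.not_eq_true] at h
      simp [List.findIdx_cons, h, ih]

theorem pv_main (raw_string : String) :
    get_valid_qname_py raw_string = get_valid_qname_py_alt raw_string := by
  unfold get_valid_qname_py get_valid_qname_py_alt
  set l := raw_string.toList with hl
  by_cases hany : l.any PySem.Chars.isalpha = true
  · -- there is some alpha char
    have hmap : (l.map PySem.Chars.isalpha).any id = true := by
      simp [List.any_map]; simpa using hany
    rw [if_pos hmap, if_neg (not_not_intro hany)]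
    set p := l.takeWhile (fun c => !PySem.Chars.isalpha c) with hp
    set s := l.dropWhile (fun c => !PySem.Chars.isalpha c) with hs
    have hsplit : p ++ s = l := List.takeWhile_append_dropWhile
    have hidx : l.findIdx PySem.Chars.isalpha = p.length := pv_findIdx_eq_takeWhile_length l
    have hpnon : ∀ c ∈ p, PySem.Chars.isalpha c = false := by
      intro c hc
      have := List.mem_takeWhile_imp (hp ▸ hc)
      simpa using this
    -- s is nonempty and starts with an alpha char
    obtain ⟨a, rest, hsar⟩ : ∃ a rest, s = a :: rest := by
      cases hse : s with
      | nil =>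
        exfalso
        have : l = p := by rw [← hsplit, hse]; simp
        rw [this] at hany
        simp only [List.any_eq_true] at hany
        obtain ⟨c, hc, hca⟩ := hany
        exact absurd hca (by simp [hpnon c hc])
      | cons a rest => exact ⟨a, rest, rfl⟩
    have haalpha : PySem.Chars.isalpha a = true := by
      have := List.head?_dropWhile_not (p := fun c => !PySem.Chars.isalpha c) (l := l)
      rw [← hs, hsar] at this
      simpa using this
    by_cases h0 : l = [] ∨ PySem.Chars.isalpha l.headI = true
    · -- first char already alpha: both sides return raw_string
      have hpnil : p = [] := by
        rcases h0 with h0 | h0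
        · simp [hp, h0]
        · cases hle : l with
          | nil => simp [hp, hle]
          | cons c t =>
            rw [hle] at h0; simp at h0
            simp [hp, hle, h0]
      simp [h0, hidx, hpnil]
    · -- first char not alpha
      have hpne : p ≠ [] := by
        intro hpe
        apply h0
        have : l = s := by rw [← hsplit, hpe]; simp
        rw [this, hsar]
        right; simpa using haalpha
      simp only [h0, if_false, hidx]
      have hidx0 : ¬ p.length = 0 := by simpa using hpne
      simp only [hidx0, if_false]
      have htake : l.take p.length = p := by rw [← hsplit]; simp
      have hdrop : l.drop p.length = s := by rw [← hsplit]; simp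
      rw [htake, hdrop, hsar]
      -- evaluate the loop
      have hloop : pvLoopA (l ++ ['-']).length (l ++ ['-'])
          = a :: (rest ++ ['-']) ++ p.filter PySem.Chars.isdigit := by
        have hre : l ++ ['-'] = p ++ a :: (rest ++ ['-']) := by
          rw [← hsplit, hsar]; simp
        rw [hre]
        exact pvLoopA_spec p _ a (rest ++ ['-'])
          (by simp) hpnon haalpha
      rw [hloop]
      set ds := p.filter PySem.Chars.isdigit with hds
      by_cases hdse : ds = []
      · -- no digits: trailing '-' is trimmed
        rw [hdse, List.append_nil,
          show a :: (rest ++ ['-']) = (a :: rest) ++ ['-'] from rfl,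
          List.getLast?_concat, if_pos rfl, List.dropLast_concat]
        simp
      · -- digits present: last char is a digit, not '-'
        obtain ⟨d, hdlast⟩ := List.getLast?_isSome.mpr hdse |> Option.isSome_iff_exists.mp
        have hdmem : d ∈ ds := List.mem_of_getLast? hdlast
        have hddig : PySem.Chars.isdigit d = true := (List.mem_filter.mp (hds ▸ hdmem)).2
        have hdne : d ≠ '-' := by
          intro h; rw [h] at hddig; simp [PySem.Chars.isdigit] at hddig
        have hlast : (a :: (rest ++ ['-']) ++ ds).getLast? = some d := by
          rw [List.getLast?_append_of_ne_nil _ hdse]; exact hdlast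
        rw [hlast]
        simp [hdse, hdne]
  · -- no alpha char at all
    have hmap : (l.map PySem.Chars.isalpha).any id = false := by
      simp only [List.any_map]
      simpa using hany
    simp [hmap, hany]

-- ===== VERDICT (by name: the statement is the Claim_ definition above) =====
theorem get_valid_qname_py_spec : Claim_equal_get_valid_qname_py := by
  intro raw_string _
  unfold Spec_get_valid_qname_py
  exact pv_main raw_string
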